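-- pv_equiv track=rewrite | github.com/bnpysse/codewars | Check Nonogram.py | check_rc
-- ===== SOURCE A (Python) =====
-- def check_rc(row_col):
--     answer = list()
--     stack = [[]]
--     for r in row_col:
--         for item in r:
--             if item.isdigit():
--                 answer.append(item)
--             elif item == '#':
--                 stack[-1].append(item)
--             elif item == '.':
--                 stack.append([])
--     return list(map(len, filter(lambda x: x != [], stack))) == list(map(int, answer))
-- ===== SOURCE B (Python) =====
-- def check_rc(row_col):
--     # Pass 1: collect the expected run lengths (the digit entries, in order).
--     expected = []
--     for r in row_col:
--         for item in r:
--             if item.isdigit():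
--                 expected.append(int(item))
--     # Pass 2: online matcher — count the current '#' run and check each run
--     # against expected[i] as soon as it closes, failing early on mismatch.
--     i = 0
--     cur = 0
--     for r in row_col:
--         for item in r:
--             if item == '#':
--                 cur += 1
--             elif item == '.' and cur:
--                 if i >= len(expected) or expected[i] != cur:
--                     return False
--                 i += 1
--                 cur = 0
--     if cur:
--         if i >= len(expected) or expected[i] != cur:
--             return False
--         i += 1
--     return i == len(expected)
-- ===== Notes on version B (the rewrite author's own statement) =====
-- stated objective: alternative
-- what changed: Replaces A's build-both-lists-then-compare (a stack of lists grown per mark, filtered of empties and length-mapped at the end, compared to the digit list) by a two-pass online matcher: collect the expected digits, then walk the marks with a run counter and an index, checking each '#' run against expected[i] the moment it closes and returning False early; no run list or stack is ever built.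
import Mathlib
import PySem

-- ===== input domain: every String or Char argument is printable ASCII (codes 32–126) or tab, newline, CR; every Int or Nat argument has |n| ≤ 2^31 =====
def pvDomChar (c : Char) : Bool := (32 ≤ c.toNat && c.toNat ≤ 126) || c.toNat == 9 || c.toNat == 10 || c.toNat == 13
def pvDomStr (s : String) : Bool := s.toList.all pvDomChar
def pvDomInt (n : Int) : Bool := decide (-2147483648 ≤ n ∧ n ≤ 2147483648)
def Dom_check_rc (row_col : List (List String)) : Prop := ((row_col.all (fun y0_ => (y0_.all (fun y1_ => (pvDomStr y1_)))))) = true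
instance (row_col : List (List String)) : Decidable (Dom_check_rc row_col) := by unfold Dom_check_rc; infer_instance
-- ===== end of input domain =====

-- B replaces A's build-both-lists-then-compare (stack of lists, filtered and
-- length-mapped at the end) by an online matcher: one pass collects the expected
-- digits, a second pass counts each '#' run and checks it against expected[i] the
-- moment it closes, returning False early; same cost, different decomposition.

-- ===== PORT A =====
-- loop body of A's inner 'for item in r'; int(item) on an isdigit item never raises on the ASCII domain,
-- so its port is (PySem.Int.ofStr? s).getD 0 (the default is unreachable there)
def pvStepA (acc : List String × List (List String)) (item : String) :
    List String × List (List String) :=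
  if PySem.Str.strIsdigit item then (acc.1 ++ [item], acc.2)
  else if item == "#" then (acc.1, acc.2.dropLast ++ [acc.2.getLast?.getD [] ++ [item]])
  else if item == "." then (acc.1, acc.2 ++ [([] : List String)])
  else acc

def check_rc (row_col : List (List String)) : Bool :=
  let res := row_col.foldl (fun acc r => r.foldl pvStepA acc)
      (([] : List String), [([] : List String)])
  decide (((res.2.filter (fun x => x ≠ [])).map (fun x => (x.length : Int)))
    = res.1.map (fun s => (PySem.Int.ofStr? s).getD 0))

-- ===== PORT B =====
-- first pass of B: append int(item) for each digit item (int never raises there, see above)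
def pvStepBd (acc : List Int) (item : String) : List Int :=
  if PySem.Str.strIsdigit item then acc ++ [(PySem.Int.ofStr? item).getD 0] else acc

-- second pass of B: state (i, cur); 'none' encodes that B has already returned False.
-- expected[i] is only read under the guard i < len(expected), so getD is exact.
def pvStepBm (expected : List Int) (st : Option (Nat × Nat)) (item : String) :
    Option (Nat × Nat) :=
  match st with
  | none => none
  | some (i, cur) =>
    if item == "#" then some (i, cur + 1)
    else if item == "." && cur != 0 then
      if expected.length ≤ i || expected.getD i 0 != (cur : Int) then none
      else some (i + 1, 0)
    else some (i, cur)

-- B's code after the loops: close a pending run, then return i == len(expected)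
def pvFinB (expected : List Int) : Option (Nat × Nat) → Bool
  | none => false
  | some (i, cur) =>
    if cur != 0 then
      if expected.length ≤ i || expected.getD i 0 != (cur : Int) then false
      else decide (i + 1 = expected.length)
    else decide (i = expected.length)

def check_rc_alt (row_col : List (List String)) : Bool :=
  let expected := row_col.foldl (fun acc r => r.foldl pvStepBd acc) ([] : List Int)
  let st := row_col.foldl (fun st r => r.foldl (pvStepBm expected) st)
      (some ((0 : Nat), (0 : Nat)))
  pvFinB expected st

-- ===== PRECONDITION & SPEC =====
def Spec_check_rc (row_col : List (List String)) (out : Bool) : Prop := out = check_rc_alt row_col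
instance (row_col : List (List String)) (out : Bool) : Decidable (Spec_check_rc row_col out) := by unfold Spec_check_rc; infer_instance

-- ===== CLAIM (what is proved, stated in full; the proofs are below) =====
def Claim_equal_check_rc : Prop := ∀ (row_col : List (List String)), Dom_check_rc row_col → Spec_check_rc row_col (check_rc row_col)

-- ===== LEMMAS AND PROOFS =====

-- the stack update of A restricted to the mark items ("#" or ".")
def pvStepM (st : List (List String)) (m : String) : List (List String) :=
  if m == "#" then st.dropLast ++ [st.getLast?.getD [] ++ [m]] else st ++ [([] : List String)]

-- run lengths (as Python ints) of the '#'-runs of an item list, k pending '#'s;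
-- items other than "#" and "." are skipped
def pvRunsS : List String → Nat → List Int
  | [], k => if k = 0 then [] else [(k : Int)]
  | s :: t, k =>
    if s == "#" then pvRunsS t (k + 1)
    else if s == "." then (if k = 0 then pvRunsS t 0 else (k : Int) :: pvRunsS t 0)
    else pvRunsS t k

-- L1: A's fold over the flat item list splits into the digit filter and the mark fold
theorem pv_foldl_stepA (l : List String) (ans : List String) (st : List (List String)) :
    l.foldl pvStepA (ans, st)
      = (ans ++ l.filter (fun s => PySem.Str.strIsdigit s),
         (l.filter (fun s => s == "#" || s == ".")).foldl pvStepM st) := by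
  induction l generalizing ans st with
  | nil => simp
  | cons hd tl ih =>
    by_cases h2 : hd = "#"
    · subst h2
      have hdig : PySem.Chars.strIsdigit ['#'] = false := by decide
      simp [pvStepA, pvStepM, hdig, ih]
    · by_cases h3 : hd = "."
      · subst h3
        have hdig : PySem.Chars.strIsdigit ['.'] = false := by decide
        simp [pvStepA, pvStepM, hdig, ih]
      · by_cases h1 : PySem.Str.strIsdigit hd
        · have h1' : PySem.Chars.strIsdigit hd.toList = true := by simpa using h1
          simp [pvStepA, h1', h2, h3, ih]
        · have h1' : PySem.Chars.strIsdigit hd.toList = false := by simpa using h1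
          simp [pvStepA, h1', h2, h3, ih]

-- L2: the filtered lengths of A's stack after the mark fold are the run lengths
theorem pv_foldl_stepM (ms : List String) (h : ∀ s ∈ ms, s = "#" ∨ s = ".")
    (pre : List (List String)) (cur : List String) :
    ((ms.foldl pvStepM (pre ++ [cur])).filter (fun x => x ≠ [])).map (fun x => (x.length : Int))
      = (pre.filter (fun x => x ≠ [])).map (fun x => (x.length : Int))
          ++ pvRunsS ms cur.length := by
  induction ms generalizing pre cur with
  | nil =>
    by_cases hc : cur = [] <;> simp [pvRunsS, hc, List.filter_append]
  | cons m t ih =>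
    have hmem : ∀ s ∈ t, s = "#" ∨ s = "." := fun s hs => h s (List.mem_cons_of_mem m hs)
    by_cases hm : m = "#"
    · subst hm
      simp only [List.foldl_cons, pvStepM, List.dropLast_concat, List.getLast?_concat,
        beq_self_eq_true, if_true, Option.getD_some]
      rw [ih hmem pre (cur ++ ["#"])]
      simp [pvRunsS]
    · have hdot : m = "." := (h m (List.mem_cons_self)).resolve_left hm
      subst hdot
      simp only [List.foldl_cons, pvStepM, show (("." : String) == "#") = false from by decide,
        Bool.false_eq_true, if_false]
      rw [ih hmem (pre ++ [cur]) []]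
      by_cases hc : cur = [] <;>
        simp [pvRunsS, hc, List.filter_append]

-- run lengths ignore the non-mark items
theorem pv_runsS_filter (l : List String) (k : Nat) :
    pvRunsS l k = pvRunsS (l.filter (fun s => s == "#" || s == ".")) k := by
  induction l generalizing k with
  | nil => rfl
  | cons s t ih =>
    by_cases h2 : s = "#"
    · subst h2; simp [pvRunsS, ih]
    · by_cases h3 : s = "."
      · subst h3; simp [pvRunsS, ih]
      · simp [pvRunsS, h2, h3, ih]

-- B's first pass is the digit filter mapped through int
theorem pv_foldl_stepBd (l : List String) (acc : List Int) :
    l.foldl pvStepBd acc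
      = acc ++ (l.filter (fun s => PySem.Str.strIsdigit s)).map
          (fun s => (PySem.Int.ofStr? s).getD 0) := by
  induction l generalizing acc with
  | nil => simp
  | cons s t ih =>
    by_cases h : PySem.Str.strIsdigit s
    · have h' : PySem.Chars.strIsdigit s.toList = true := by simpa using h
      simp [pvStepBd, h', ih]
    · have h' : PySem.Chars.strIsdigit s.toList = false := by simpa using h
      simp [pvStepBd, h', ih]

-- the failure state of B's matcher is absorbing
theorem pv_foldl_none (e : List Int) (l : List String) :
    l.foldl (pvStepBm e) none = none := by
  induction l with
  | nil => rfl
  | cons s t ih => simpa [pvStepBm] using ih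

-- L3: B's online matcher decides 'the remaining runs equal the remaining expected list'
theorem pv_matchB (e : List Int) (l : List String) (i cur : Nat) (hi : i ≤ e.length) :
    pvFinB e (l.foldl (pvStepBm e) (some (i, cur)))
      = decide (pvRunsS l cur = e.drop i) := by
  induction l generalizing i cur with
  | nil =>
    by_cases hc : cur = 0
    · subst hc
      simp only [List.foldl_nil, pvFinB, pvRunsS, bne_self_eq_false,
        Bool.false_eq_true, if_false]
      by_cases he : i = e.length
      · simp [he, List.drop_eq_nil_of_le]
      · have hne : e.drop i ≠ [] := by
          simp only [ne_eq, List.drop_eq_nil_iff]; omega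
        simp [he, hne.symm]
    · simp only [List.foldl_nil, pvFinB, pvRunsS, if_neg hc]
      rw [if_pos (by simpa using hc)]
      by_cases h1 : e.length ≤ i
      · have hd : e.drop i = [] := List.drop_eq_nil_of_le h1
        have hne : i = e.length := le_antisymm hi h1
        simp [h1, hd]
      · have hlt : i < e.length := by omega
        have hd : e.drop i = e[i] :: e.drop (i + 1) := List.drop_eq_getElem_cons hlt
        have hgd : e[i]? = some e[i] := List.getElem?_eq_getElem hlt
        by_cases h2 : e[i] = (cur : Int)
        · have hb : (decide (e.length ≤ i) || List.getD e i 0 != (cur : Int)) = false := by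
            simp [List.getD, h1, hgd, h2]
          rw [hb, if_neg (by simp)]
          by_cases h3 : i + 1 = e.length
          · have hnil : e.drop (i + 1) = [] := List.drop_eq_nil_of_le (by omega)
            have hgoal : [(cur : Int)] = e.drop i := by rw [hd, hnil, h2]
            simp [h3, hgoal]
          · have hne : e.drop (i + 1) ≠ [] := by
              simp only [ne_eq, List.drop_eq_nil_iff]; omega
            have hgoal : ¬ ([(cur : Int)] = e.drop i) := by
              rw [hd]
              intro hcon
              exact hne ((List.cons.injEq _ _ _ _).mp hcon.symm).2
            simp [h3, hgoal]
        · have hb : (decide (e.length ≤ i) || List.getD e i 0 != (cur : Int)) = true := by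
            simp [List.getD, hgd, h2]
          rw [hb, if_pos rfl]
          have hgoal : ¬ ([(cur : Int)] = e.drop i) := by
            rw [hd]
            intro hcon
            exact h2 ((List.cons.injEq _ _ _ _).mp hcon.symm).1
          simp [hgoal]
  | cons s t ih =>
    by_cases h2 : s = "#"
    · subst h2
      simp only [List.foldl_cons, pvStepBm, beq_self_eq_true, if_true]
      rw [ih i (cur + 1) hi]
      simp [pvRunsS]
    · by_cases h3 : s = "."
      · subst h3
        by_cases hc : cur = 0
        · subst hc
          simp only [List.foldl_cons, pvStepBm, show (("." : String) == "#") = false from by decide,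
            Bool.false_eq_true, if_false, bne_self_eq_false, Bool.and_false]
          rw [ih i 0 hi]
          simp [pvRunsS]
        · simp only [List.foldl_cons, pvStepBm, show (("." : String) == "#") = false from by decide,
            Bool.false_eq_true, if_false]
          rw [if_pos (by simp [hc])]
          by_cases h1 : e.length ≤ i
          · have hd : e.drop i = [] := List.drop_eq_nil_of_le h1
            rw [if_pos (by simp [h1]), pv_foldl_none, hd]
            simp [pvFinB, pvRunsS, hc]
          · have hlt : i < e.length := by omega
            have hd : e.drop i = e[i] :: e.drop (i + 1) := List.drop_eq_getElem_cons hlt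
            have hgd : e[i]? = some e[i] := List.getElem?_eq_getElem hlt
            by_cases h4 : e[i] = (cur : Int)
            · rw [if_neg (by simp [List.getD, h1, hgd, h4]), ih (i + 1) 0 (by omega)]
              have hcons : ((cur : Int) :: pvRunsS t 0 = e.drop i)
                  ↔ (pvRunsS t 0 = e.drop (i + 1)) := by
                rw [hd, h4]
                constructor
                · intro hcon; exact ((List.cons.injEq _ _ _ _).mp hcon).2
                · intro hcon; rw [hcon]
              simp [pvRunsS, hc, hcons]
            · rw [if_pos (by simp [List.getD, hgd, h4]), pv_foldl_none]
              have hgoal : ¬ ((cur : Int) :: pvRunsS t 0 = e.drop i) := by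
                rw [hd]
                intro hcon
                exact h4 ((List.cons.injEq _ _ _ _).mp hcon.symm).1
              simp [pvFinB, pvRunsS, hc, hgoal]
      · simp only [List.foldl_cons, pvStepBm,
          show (s == "#") = false from by simp [h2],
          show (s == ".") = false from by simp [h3], Bool.false_eq_true, if_false,
          Bool.false_and]
        rw [ih i cur hi]
        simp [pvRunsS, h2, h3]

-- ===== VERDICT (by name: the statement is the Claim_ definition above) =====
theorem check_rc_spec : Claim_equal_check_rc := by
  intro row_col _
  unfold Spec_check_rc check_rc check_rc_alt
  have hA : row_col.foldl (fun acc r => r.foldl pvStepA acc)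
      (([] : List String), [([] : List String)])
      = (row_col.flatMap (fun row => row)).foldl pvStepA
          (([] : List String), [([] : List String)]) := by
    rw [List.foldl_flatMap]
  have hBe : row_col.foldl (fun acc r => r.foldl pvStepBd acc) ([] : List Int)
      = (row_col.flatMap (fun row => row)).foldl pvStepBd ([] : List Int) := by
    rw [List.foldl_flatMap]
  set flat := row_col.flatMap (fun row => row) with hflat
  set e := (flat.filter (fun s => PySem.Str.strIsdigit s)).map
      (fun s => (PySem.Int.ofStr? s).getD 0) with he
  have hBe2 : row_col.foldl (fun acc r => r.foldl pvStepBd acc) ([] : List Int) = e := by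
    rw [hBe, pv_foldl_stepBd, List.nil_append]
  have hBm : row_col.foldl (fun st r => r.foldl (pvStepBm
        (row_col.foldl (fun acc r => r.foldl pvStepBd acc) ([] : List Int))) st)
        (some ((0 : Nat), (0 : Nat)))
      = flat.foldl (pvStepBm e) (some ((0 : Nat), (0 : Nat))) := by
    rw [hBe2, List.foldl_flatMap]
  rw [hA, pv_foldl_stepA, List.nil_append]
  dsimp only
  rw [hBm, hBe2, pv_matchB e flat 0 0 (by omega), List.drop_zero]
  have hAr : ((((flat.filter (fun s => s == "#" || s == ".")).foldl pvStepM
        [([] : List String)]).filter (fun x => x ≠ [])).map (fun x => (x.length : Int)))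
      = pvRunsS flat 0 := by
    have h2 := pv_foldl_stepM (flat.filter (fun s => s == "#" || s == "."))
      (fun s hs => by
        have := List.of_mem_filter hs
        rcases Bool.or_eq_true_iff.mp this with h | h
        · exact Or.inl (by simpa using h)
        · exact Or.inr (by simpa using h))
      ([] : List (List String)) ([] : List String)
    rw [pv_runsS_filter flat 0]
    simpa using h2
  rw [← he, hAr]
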